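-- pv_equiv track=rewrite | github.com/angelinn/HackBulgaria | week5/Cinema Reservation System/seat.py | string_to_seat_tuple
-- ===== SOURCE A (Python) =====
-- def string_to_seat_tuple(string):
--     x = 0
--     y = 0
--
--     done = False
--
--     for char in string:
--         if char >= '0' and char <= '9':
--             if done is False:
--                 done = True
--                 x = int(char)
--             else:
--                 y = int(char)
--
--     if done is False:
--         raise ValueError
--
--     return (x, y)
-- ===== SOURCE B (Python) =====
-- def string_to_seat_tuple(string):
--     for i, c in enumerate(string):
--         if '0' <= c <= '9':
--             x = int(c)
--             break
--     else:
--         raise ValueError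
--     y = next((int(c) for c in reversed(string[i + 1:]) if '0' <= c <= '9'), 0)
--     return (x, y)
-- ===== Notes on version B (the rewrite author's own statement) =====
-- stated objective: alternative
-- what changed: Replaces A's single flag-driven overwrite pass by two short-circuiting directional searches: an enumerate loop that breaks at the first digit (x), then a right-to-left search of the remaining suffix for its first digit (y, default 0); the middle of the string after the last digit is never overwritten step by step and both searches stop early.
import Mathlib
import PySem

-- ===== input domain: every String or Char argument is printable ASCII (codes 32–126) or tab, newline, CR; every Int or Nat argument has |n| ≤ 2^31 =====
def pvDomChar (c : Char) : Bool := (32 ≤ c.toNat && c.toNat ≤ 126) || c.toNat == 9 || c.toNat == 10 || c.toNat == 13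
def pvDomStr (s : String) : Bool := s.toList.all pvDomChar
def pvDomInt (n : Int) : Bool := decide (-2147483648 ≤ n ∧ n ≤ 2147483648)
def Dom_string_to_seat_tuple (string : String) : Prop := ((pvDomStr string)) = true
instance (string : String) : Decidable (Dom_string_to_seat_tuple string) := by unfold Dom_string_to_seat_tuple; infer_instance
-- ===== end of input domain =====

-- B replaces A's flag-driven overwrite pass by two short-circuiting directional searches (first digit forward, then first digit of the reversed suffix); objective: alternative.


-- ===== PORT A =====
-- A's loop: state (x, y, done); int(char) on a digit char is exact as (c.toNat - 48 : Int).
def pvStepA (s : Int × Int × Bool) (c : Char) : Int × Int × Bool :=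
  if '0' ≤ c ∧ c ≤ '9' then
    if s.2.2 = false then ((c.toNat - 48 : Int), s.2.1, true)
    else (s.1, (c.toNat - 48 : Int), s.2.2)
  else s

-- raises ValueError when done is still False at the end: those inputs are excluded by Pre_.
def string_to_seat_tuple (string : String) : Int × Int :=
  let st := string.toList.foldl pvStepA (0, 0, false)
  (st.1, st.2.1)

-- ===== PORT B =====
-- forward search with break: returns (x, suffix after the first digit), none = the for/else raise
def pvFindFwd : List Char → Option (Int × List Char)
  | [] => none
  | c :: t => if '0' ≤ c ∧ c ≤ '9' then some ((c.toNat - 48 : Int), t) else pvFindFwd t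

-- next(... reversed suffix ..., 0): first digit value of the given (already reversed) list, default 0
def pvNextDig : List Char → Int
  | [] => 0
  | c :: t => if '0' ≤ c ∧ c ≤ '9' then (c.toNat - 48 : Int) else pvNextDig t

def string_to_seat_tuple_alt (string : String) : Int × Int :=
  match pvFindFwd string.toList with
  | none => (0, 0)          -- Source B raises ValueError here: excluded by Pre_
  | some (x, rest) => (x, pvNextDig rest.reverse)

-- ===== PRECONDITION & SPEC =====
-- Pre_ excludes exactly the strings with no digit character, on which A (and B) raise ValueError.
def Pre_string_to_seat_tuple (string : String) : Prop :=
  string.toList.any (fun c => decide ('0' ≤ c ∧ c ≤ '9')) = true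
instance (string : String) : Decidable (Pre_string_to_seat_tuple string) := by
  unfold Pre_string_to_seat_tuple; infer_instance

def pvWitness_string_to_seat_tuple : String := "a1b2c3"

def Spec_string_to_seat_tuple (string : String) (out : Int × Int) : Prop := out = string_to_seat_tuple_alt string
instance (string : String) (out : Int × Int) : Decidable (Spec_string_to_seat_tuple string out) := by unfold Spec_string_to_seat_tuple; infer_instance

-- ===== CLAIM (what is proved, stated in full; the proofs are below) =====
def Claim_equal_string_to_seat_tuple : Prop := ∀ (string : String), Dom_string_to_seat_tuple string → Pre_string_to_seat_tuple string → Spec_string_to_seat_tuple string (string_to_seat_tuple string)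

-- ===== LEMMAS AND PROOFS =====

-- digit values of a char list
def pvDigs (l : List Char) : List Int :=
  (l.filter (fun c => decide ('0' ≤ c ∧ c ≤ '9'))).map (fun c => (c.toNat - 48 : Int))

-- A's loop once done = true: x frozen, y tracks the last digit seen (default y)
theorem foldA_true (l : List Char) (x y : Int) :
    l.foldl pvStepA (x, y, true) = (x, (pvDigs l).getLastD y, true) := by
  induction l generalizing y with
  | nil => simp [pvDigs]
  | cons c l ih =>
    by_cases h : ('0' ≤ c ∧ c ≤ '9')
    · have hd : pvDigs (c :: l) = (c.toNat - 48 : Int) :: pvDigs l := by simp [pvDigs, h]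
      rw [List.foldl_cons, hd, List.getLastD_cons]
      simp [pvStepA, h, ih]
    · have hd : pvDigs (c :: l) = pvDigs l := by simp [pvDigs, h]
      rw [List.foldl_cons, hd]
      simp [pvStepA, h, ih]

-- A from the initial state, phrased through B's forward search
theorem foldA_false (l : List Char) :
    l.foldl pvStepA (0, 0, false) =
      match pvFindFwd l with
      | none => (0, 0, false)
      | some (x, rest) => (x, (pvDigs rest).getLastD 0, true) := by
  induction l with
  | nil => simp [pvFindFwd]
  | cons c l ih =>
    by_cases h : ('0' ≤ c ∧ c ≤ '9')
    · simp [List.foldl_cons, pvStepA, pvFindFwd, h, foldA_true]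
    · simpa [List.foldl_cons, pvStepA, pvFindFwd, h] using ih

-- B's backward search = last digit of the un-reversed list (default 0)
theorem pvNextDig_eq (l : List Char) : pvNextDig l = (pvDigs l).headD 0 := by
  induction l with
  | nil => simp [pvNextDig, pvDigs]
  | cons c l ih =>
    by_cases h : ('0' ≤ c ∧ c ≤ '9')
    · simp [pvNextDig, pvDigs, h]
    · simpa [pvNextDig, pvDigs, h] using ih

theorem pvDigs_reverse (l : List Char) : pvDigs l.reverse = (pvDigs l).reverse := by
  simp [pvDigs]

theorem pvFindFwd_none (l : List Char) (h : pvFindFwd l = none) : pvDigs l = [] := by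
  induction l with
  | nil => simp [pvDigs]
  | cons c l ih =>
    by_cases hc : ('0' ≤ c ∧ c ≤ '9')
    · simp [pvFindFwd, hc] at h
    · simp [pvFindFwd, hc] at h
      simpa [pvDigs, hc] using ih h

-- ===== VERDICT (by name: the statement is the Claim_ definition above) =====
theorem string_to_seat_tuple_spec : Claim_equal_string_to_seat_tuple := by
  intro s _ hpre
  unfold Spec_string_to_seat_tuple string_to_seat_tuple string_to_seat_tuple_alt
  rw [foldA_false]
  rcases hf : pvFindFwd s.toList with _ | ⟨x, rest⟩
  · exfalso
    unfold Pre_string_to_seat_tuple at hpre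
    rcases List.any_eq_true.mp hpre with ⟨c, hc, hcd⟩
    have hm : c ∈ s.toList.filter (fun c => decide ('0' ≤ c ∧ c ≤ '9')) :=
      List.mem_filter.mpr ⟨hc, hcd⟩
    have : ((c.toNat - 48 : Int)) ∈ pvDigs s.toList := List.mem_map_of_mem hm
    rw [pvFindFwd_none s.toList hf] at this
    simp at this
  · simp only [pvNextDig_eq, pvDigs_reverse]
    cases hr : pvDigs rest with
    | nil => simp
    | cons a t => simp [List.head?_reverse, List.getLast?_cons, List.getLastD_eq_getLast?]
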